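-- pv_equiv track=rewrite | github.com/craig-rupp/SSS_Python | 18/RMOTR/Unit3_Class1/Card2-9.py | create_empty_box
-- ===== SOURCE A (Python) =====
-- def create_empty_box(height, width, char):
--     if height < 3 or width < 3:
--         return 'Invalid box dimensions'
--     else:
--         box = ''
--         first_last = [0, height - 1]
--         for i in range(height):
--             row = ''
--             for l in range(width):
--                 if i in first_last:
--                     row += char
--                 else:
--                     col_first_last = [0, width - 1]
--                     if l in col_first_last:
--                         row += char
--                     else:
--                         row += ' '
--             box += row + '\n'
--         return box
-- ===== SOURCE B (Python) =====
-- def create_empty_box(height, width, char):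
--     if height < 3 or width < 3:
--         return 'Invalid box dimensions'
--     full = char * width + '\n'
--     mid = char + ' ' * (width - 2) + char + '\n'
--     return full + mid * (height - 2) + full
-- ===== Notes on version B (the rewrite author's own statement) =====
-- stated objective: simpler
-- what changed: Replaced the nested per-cell loops with whole-row construction by string repetition: one full row, height-2 copies of a hollow middle row, and the full row again.
import Mathlib
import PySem

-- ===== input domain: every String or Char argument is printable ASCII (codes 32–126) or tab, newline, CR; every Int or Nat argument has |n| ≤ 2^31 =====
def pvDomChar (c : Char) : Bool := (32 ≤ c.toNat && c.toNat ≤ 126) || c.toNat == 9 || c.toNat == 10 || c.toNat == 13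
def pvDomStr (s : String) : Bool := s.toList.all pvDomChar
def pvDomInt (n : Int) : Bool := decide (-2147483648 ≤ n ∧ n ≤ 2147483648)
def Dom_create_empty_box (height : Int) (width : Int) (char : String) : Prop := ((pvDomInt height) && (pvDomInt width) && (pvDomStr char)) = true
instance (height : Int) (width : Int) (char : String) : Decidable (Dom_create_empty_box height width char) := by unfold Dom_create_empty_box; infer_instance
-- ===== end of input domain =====

-- ===== PORT A =====
-- literal transliteration of A: nested loops over range(height) × range(width),
-- appending char/space per cell, each row followed by '\n'
def create_empty_box (height : Int) (width : Int) (char : String) : String :=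
  if height < 3 ∨ width < 3 then "Invalid box dimensions"
  else
    let first_last : List Int := [0, height - 1]
    (PySem.List.pyRange 0 height 1).foldl (fun box i =>
      let row := (PySem.List.pyRange 0 width 1).foldl (fun row l =>
        if i ∈ first_last then row ++ char
        else
          let col_first_last : List Int := [0, width - 1]
          if l ∈ col_first_last then row ++ char else row ++ " ") ""
      box ++ row ++ "\n") ""

-- ===== PORT B =====
-- Python's 's * n' (string repetition, empty for n ≤ 0)
def repStr (s : String) : Nat → String
  | 0 => ""
  | k + 1 => s ++ repStr s k

def pyStrMul (s : String) (n : Int) : String := repStr s n.toNat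

def create_empty_box_alt (height : Int) (width : Int) (char : String) : String :=
  if height < 3 ∨ width < 3 then "Invalid box dimensions"
  else
    let full := pyStrMul char width ++ "\n"
    let mid := char ++ pyStrMul " " (width - 2) ++ char ++ "\n"
    full ++ pyStrMul mid (height - 2) ++ full

-- ===== PRECONDITION & SPEC =====
def Spec_create_empty_box (height : Int) (width : Int) (char : String) (out : String) : Prop := out = create_empty_box_alt height width char
instance (height : Int) (width : Int) (char : String) (out : String) : Decidable (Spec_create_empty_box height width char out) := by unfold Spec_create_empty_box; infer_instance

-- ===== CLAIM (what is proved, stated in full; the proofs are below) =====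
def Claim_equal_create_empty_box : Prop := ∀ (height : Int) (width : Int) (char : String), Dom_create_empty_box height width char → Spec_create_empty_box height width char (create_empty_box height width char)

-- ===== LEMMAS AND PROOFS =====

-- concatenation of f over a list (the value a string-building foldl accumulates)
def catMap {α : Type} (f : α → String) : List α → String
  | [] => ""
  | x :: xs => f x ++ catMap f xs

theorem foldl_append_catMap {α : Type} (f : α → String) :
    ∀ (xs : List α) (s : String), xs.foldl (fun r x => r ++ f x) s = s ++ catMap f xs
  | [], s => by simp [catMap, String.append_empty]
  | x :: xs, s => by
      simp only [List.foldl_cons, catMap, foldl_append_catMap f xs, String.append_assoc]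

theorem catMap_map {α β : Type} (f : β → String) (g : α → β) (xs : List α) :
    catMap f (xs.map g) = catMap (fun x => f (g x)) xs := by
  induction xs with
  | nil => rfl
  | cons x xs ih => simp [catMap, ih]

theorem catMap_congr {α : Type} {f g : α → String} {xs : List α}
    (h : ∀ x ∈ xs, f x = g x) : catMap f xs = catMap g xs := by
  induction xs with
  | nil => rfl
  | cons x xs ih =>
      simp only [catMap, h x (List.mem_cons_self ..),
        ih (fun y hy => h y (List.mem_cons_of_mem _ hy))]

theorem catMap_const {α : Type} (s : String) (xs : List α) :
    catMap (fun _ => s) xs = repStr s xs.length := by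
  induction xs with
  | nil => rfl
  | cons x xs ih => simp [catMap, repStr, ih]

-- a row/box with `a` at both ends and n-2 copies of `b` in between
theorem catMap_range_boundary (n : Nat) (a b : String) (hn : 2 ≤ n) :
    catMap (fun k => if k = 0 ∨ k = n - 1 then a else b) (List.range n)
      = a ++ repStr b (n - 2) ++ a := by
  obtain ⟨m, rfl⟩ : ∃ m, n = m + 2 := ⟨n - 2, by omega⟩
  have hsplit : List.range (m + 2) = List.range (m + 1) ++ [m + 1] := List.range_succ
  have happ : ∀ (f : Nat → String) (xs ys : List Nat),
      catMap f (xs ++ ys) = catMap f xs ++ catMap f ys := by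
    intro f xs ys
    induction xs with
    | nil => simp [catMap, String.empty_append]
    | cons x xs ih => simp [catMap, ih, String.append_assoc]
  rw [hsplit, happ]
  have h2 : catMap (fun k => if k = 0 ∨ k = m + 2 - 1 then a else b) [m + 1] = a := by
    simp [catMap, String.append_empty]
  have h1 : catMap (fun k => if k = 0 ∨ k = m + 2 - 1 then a else b) (List.range (m + 1))
      = a ++ repStr b m := by
    rw [catMap_congr (g := fun k => if k = 0 then a else b)
      (by intro x hx; simp only [List.mem_range] at hx
          by_cases h0 : x = 0
          · simp [h0]
          · rw [if_neg (by omega)]; simp [h0])]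
    rw [List.range_succ_eq_map, catMap, catMap_map]
    rw [catMap_congr (g := fun _ : Nat => b) (by intro x hx; simp),
      catMap_const, List.length_range]
    simp
  rw [h1, h2]
  simp [String.append_assoc]

-- ===== VERDICT (by name: the statement is the Claim_ definition above) =====
theorem create_empty_box_spec : Claim_equal_create_empty_box := by
  intro h w c _
  unfold Spec_create_empty_box create_empty_box create_empty_box_alt
  dsimp only
  by_cases hiv : h < 3 ∨ w < 3
  · rw [if_pos hiv, if_pos hiv]
  · rw [if_neg hiv, if_neg hiv]
    rw [not_or, not_lt, not_lt] at hiv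
    obtain ⟨h3, w3⟩ := hiv
    have houter : (fun (box : String) (i : Int) =>
        box ++ (PySem.List.pyRange 0 w 1).foldl (fun row l =>
          if i ∈ ([0, h - 1] : List Int) then row ++ c
          else if l ∈ ([0, w - 1] : List Int) then row ++ c else row ++ " ") "" ++ "\n")
        = fun (box : String) (i : Int) =>
        box ++ ((PySem.List.pyRange 0 w 1).foldl (fun row l =>
          if i ∈ ([0, h - 1] : List Int) then row ++ c
          else if l ∈ ([0, w - 1] : List Int) then row ++ c else row ++ " ") "" ++ "\n") := by
      funext box i; rw [String.append_assoc]
    rw [houter, foldl_append_catMap, String.empty_append,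
      PySem.List.pyRange_one, PySem.List.pyRange_one, catMap_map]
    have hlen : (h - 0).toNat = h.toNat := by omega
    rw [hlen]
    rw [catMap_congr (g := fun k : Nat => if k = 0 ∨ k = h.toNat - 1
            then pyStrMul c w ++ "\n"
            else c ++ pyStrMul " " (w - 2) ++ c ++ "\n")
      (by
        intro k hk
        simp only [List.mem_range] at hk
        dsimp only
        by_cases htop : k = 0 ∨ k = h.toNat - 1
        · have hmem : (0 + (k : Int)) ∈ ([0, h - 1] : List Int) := by
            simp only [List.mem_cons, List.not_mem_nil, or_false]
            omega
          simp only [if_pos hmem, if_pos htop]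
          rw [foldl_append_catMap (fun _ : Int => c), String.empty_append,
            catMap_map, catMap_const, List.length_range]
          have hw0 : (w - 0).toNat = w.toNat := by omega
          rw [hw0]
          rfl
        · have hmem : (0 + (k : Int)) ∉ ([0, h - 1] : List Int) := by
            simp only [List.mem_cons, List.not_mem_nil, or_false]
            omega
          simp only [if_neg hmem, if_neg htop]
          rw [show (fun (row : String) (l : Int) =>
                if l ∈ ([0, w - 1] : List Int) then row ++ c else row ++ " ")
              = fun (row : String) (l : Int) =>
                row ++ (if l ∈ ([0, w - 1] : List Int) then c else " ") from by
            funext r l; split <;> rfl]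
          rw [foldl_append_catMap
              (fun l : Int => if l ∈ ([0, w - 1] : List Int) then c else " "),
            String.empty_append, catMap_map]
          have hw0 : (w - 0).toNat = w.toNat := by omega
          rw [hw0]
          rw [catMap_congr (g := fun j : Nat => if j = 0 ∨ j = w.toNat - 1 then c else " ")
            (by
              intro j hj
              simp only [List.mem_range] at hj
              dsimp only
              by_cases hb : j = 0 ∨ j = w.toNat - 1
              · rw [if_pos hb, if_pos (by
                  simp only [List.mem_cons, List.not_mem_nil, or_false]
                  omega)]
              · rw [if_neg hb, if_neg (by
                  simp only [List.mem_cons, List.not_mem_nil, or_false]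
                  omega)])]
          rw [catMap_range_boundary w.toNat c " " (by omega)]
          have hw2 : (w - 2).toNat = w.toNat - 2 := by omega
          simp [pyStrMul, hw2, String.append_assoc])]
    rw [catMap_range_boundary h.toNat (pyStrMul c w ++ "\n")
      (c ++ pyStrMul " " (w - 2) ++ c ++ "\n") (by omega)]
    have hh2 : (h - 2).toNat = h.toNat - 2 := by omega
    simp [pyStrMul, hh2, String.append_assoc]
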